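-- pv_equiv track=rewrite | github.com/harshk04/RAG-Voice-Agent | tools.py | _wants_dashboard_pin
-- ===== SOURCE A (Python) =====
-- def _wants_dashboard_pin(query: str) -> bool:
--     lowered = (query or "").lower()
--     if "dashboard" not in lowered:
--         return False
--     return any(
--         phrase in lowered
--         for phrase in (
--             "add on dashboard",
--             "add to dashboard",
--             "pin to dashboard",
--             "pin on dashboard",
--             "save to dashboard",
--             "save on dashboard",
--         )
--     )
-- ===== SOURCE B (Python) =====
-- def _wants_dashboard_pin(query: str) -> bool:
--     s = (query or "").lower()
--     while s:
--         for verb in ("add", "pin", "save"):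
--             if s.startswith(verb):
--                 rest = s[len(verb):]
--                 if rest.startswith(" on dashboard") or rest.startswith(" to dashboard"):
--                     return True
--         s = s[1:]
--     return False
-- ===== Notes on version B (the rewrite author's own statement) =====
-- stated objective: alternative
-- what changed: B replaces the keyword guard plus six separate whole-string substring tests by a single left-to-right suffix scan that checks the verb and preposition prefixes at each position, traversing the string once.
import Mathlib
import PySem

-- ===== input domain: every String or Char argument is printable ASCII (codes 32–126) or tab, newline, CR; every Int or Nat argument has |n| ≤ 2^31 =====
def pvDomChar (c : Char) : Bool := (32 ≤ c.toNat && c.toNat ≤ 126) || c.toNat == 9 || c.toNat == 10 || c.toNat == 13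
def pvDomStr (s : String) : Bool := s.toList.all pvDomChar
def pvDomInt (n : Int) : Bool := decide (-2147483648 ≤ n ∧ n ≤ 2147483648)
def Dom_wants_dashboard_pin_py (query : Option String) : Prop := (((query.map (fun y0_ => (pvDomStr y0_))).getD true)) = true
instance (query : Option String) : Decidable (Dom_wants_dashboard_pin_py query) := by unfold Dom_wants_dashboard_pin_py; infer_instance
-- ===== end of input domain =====

-- B replaces A's six whole-string substring tests (one scan each) by a single left-to-right
-- suffix scan that checks verb/preposition prefixes at each position; objective: alternative.

-- ===== PORT A =====
-- lowered = (query or "").lower(); guard "dashboard" in lowered; then any() over the six phrases via 'in'.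
def wants_dashboard_pin_py (query : Option String) : Bool :=
  let lowered := PySem.Chars.lower (query.getD "").toList
  if !(PySem.Chars.isIn "dashboard".toList lowered) then false
  else
    ["add on dashboard".toList, "add to dashboard".toList, "pin to dashboard".toList,
     "pin on dashboard".toList, "save to dashboard".toList, "save on dashboard".toList].any
      (fun phrase => PySem.Chars.isIn phrase lowered)

-- ===== PORT B =====
-- the body of B's while-loop: one round of 'for verb in ("add","pin","save")' at the current suffix s
def pvHitB (s : List Char) : Bool :=
  ["add".toList, "pin".toList, "save".toList].any (fun verb =>
    PySem.Chars.startswith s verb &&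
      (let rest := s.drop verb.length
       PySem.Chars.startswith rest " on dashboard".toList ||
       PySem.Chars.startswith rest " to dashboard".toList))

-- while s: … ; s = s[1:]
def pvScanB : List Char → Bool
  | [] => false
  | c :: t => if pvHitB (c :: t) then true else pvScanB t

def wants_dashboard_pin_py_alt (query : Option String) : Bool :=
  pvScanB (PySem.Chars.lower (query.getD "").toList)

-- ===== PRECONDITION & SPEC =====
def Spec_wants_dashboard_pin_py (query : Option String) (out : Bool) : Prop := out = wants_dashboard_pin_py_alt query
instance (query : Option String) (out : Bool) : Decidable (Spec_wants_dashboard_pin_py query out) := by unfold Spec_wants_dashboard_pin_py; infer_instance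

-- ===== CLAIM (what is proved, stated in full; the proofs are below) =====
def Claim_equal_wants_dashboard_pin_py : Prop := ∀ (query : Option String), Dom_wants_dashboard_pin_py query → Spec_wants_dashboard_pin_py query (wants_dashboard_pin_py query)

-- ===== LEMMAS AND PROOFS =====

-- splitting a prefix test of a concatenation
theorem pv_append_prefix_iff (a b s : List Char) :
    (a ++ b <+: s) ↔ (a <+: s ∧ b <+: s.drop a.length) := by
  constructor
  · rintro ⟨t, rfl⟩
    exact ⟨⟨b ++ t, by simp⟩, by simp⟩
  · rintro ⟨⟨t, rfl⟩, hb⟩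
    rw [List.drop_append] at hb
    simp at hb
    obtain ⟨u, rfl⟩ := hb
    exact ⟨u, by simp⟩

-- one round of B's inner for-loop, stated for arbitrary verbs/prepositions
theorem pv_hit_gen (v1 v2 v3 p q s : List Char) :
    ([v1, v2, v3].any (fun verb =>
      PySem.Chars.startswith s verb &&
        (let rest := s.drop verb.length
         PySem.Chars.startswith rest p ||
         PySem.Chars.startswith rest q))) = true ↔
    (v1 ++ p <+: s) ∨ (v1 ++ q <+: s) ∨ (v2 ++ p <+: s) ∨ (v2 ++ q <+: s) ∨
    (v3 ++ p <+: s) ∨ (v3 ++ q <+: s) := by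
  simp only [List.any_cons, List.any_nil, Bool.or_eq_true, Bool.false_eq_true, or_false,
    Bool.and_eq_true, PySem.Chars.startswith_iff, pv_append_prefix_iff, and_or_left]
  tauto

-- B's inner round fires exactly when one of the six phrases starts at s
theorem pvHitB_iff (s : List Char) :
    pvHitB s = true ↔
    ("add".toList ++ " on dashboard".toList <+: s) ∨ ("add".toList ++ " to dashboard".toList <+: s) ∨
    ("pin".toList ++ " on dashboard".toList <+: s) ∨ ("pin".toList ++ " to dashboard".toList <+: s) ∨
    ("save".toList ++ " on dashboard".toList <+: s) ∨ ("save".toList ++ " to dashboard".toList <+: s) :=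
  pv_hit_gen "add".toList "pin".toList "save".toList " on dashboard".toList " to dashboard".toList s

-- B's while-loop fires exactly when some suffix starts with a hit
theorem pvScanB_iff (s : List Char) : pvScanB s = true ↔ ∃ j, pvHitB (s.drop j) = true := by
  induction s with
  | nil => simp [pvScanB, List.drop_nil, show pvHitB [] = false from by decide]
  | cons c t ih =>
    simp only [pvScanB]
    split_ifs with h
    · exact ⟨fun _ => ⟨0, h⟩, fun _ => rfl⟩
    · rw [ih]
      constructor
      · rintro ⟨j, hj⟩; exact ⟨j + 1, by simpa using hj⟩
      · rintro ⟨j, hj⟩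
        match j with
        | 0 => exact absurd hj (by simpa using h)
        | j + 1 => exact ⟨j, by simpa using hj⟩

theorem pvIsIn_of_prefix_drop {p s : List Char} (j : Nat) (h : p <+: s.drop j) :
    PySem.Chars.isIn p s = true :=
  (PySem.Chars.exists_prefix_drop_iff_isIn p s).mp ⟨j, h⟩

-- B's scan fires exactly when one of A's six phrase-membership tests does
theorem pv_scan_iff_any (s : List Char) :
    pvScanB s = true ↔
    (PySem.Chars.isIn "add on dashboard".toList s = true ∨
     PySem.Chars.isIn "add to dashboard".toList s = true ∨
     PySem.Chars.isIn "pin to dashboard".toList s = true ∨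
     PySem.Chars.isIn "pin on dashboard".toList s = true ∨
     PySem.Chars.isIn "save to dashboard".toList s = true ∨
     PySem.Chars.isIn "save on dashboard".toList s = true) := by
  rw [pvScanB_iff]
  constructor
  · rintro ⟨j, hj⟩
    rw [pvHitB_iff] at hj
    rcases hj with h | h | h | h | h | h
    · exact Or.inl (pvIsIn_of_prefix_drop j h)
    · exact Or.inr (Or.inl (pvIsIn_of_prefix_drop j h))
    · exact Or.inr (Or.inr (Or.inr (Or.inl (pvIsIn_of_prefix_drop j h))))
    · exact Or.inr (Or.inr (Or.inl (pvIsIn_of_prefix_drop j h)))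
    · exact Or.inr (Or.inr (Or.inr (Or.inr (Or.inr (pvIsIn_of_prefix_drop j h)))))
    · exact Or.inr (Or.inr (Or.inr (Or.inr (Or.inl (pvIsIn_of_prefix_drop j h)))))
  · intro h
    rcases h with h | h | h | h | h | h <;>
      obtain ⟨j, hj⟩ := (PySem.Chars.exists_prefix_drop_iff_isIn _ s).mpr h
    · exact ⟨j, (pvHitB_iff _).mpr (Or.inl hj)⟩
    · exact ⟨j, (pvHitB_iff _).mpr (Or.inr (Or.inl hj))⟩
    · exact ⟨j, (pvHitB_iff _).mpr (Or.inr (Or.inr (Or.inr (Or.inl hj))))⟩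
    · exact ⟨j, (pvHitB_iff _).mpr (Or.inr (Or.inr (Or.inl hj)))⟩
    · exact ⟨j, (pvHitB_iff _).mpr (Or.inr (Or.inr (Or.inr (Or.inr (Or.inr hj)))))⟩
    · exact ⟨j, (pvHitB_iff _).mpr (Or.inr (Or.inr (Or.inr (Or.inr (Or.inl hj)))))⟩

-- if B's scan fires, "dashboard" is a substring (each phrase ends with it)
theorem pv_dash_of_scan {s : List Char} (h : pvScanB s = true) :
    PySem.Chars.isIn "dashboard".toList s = true := by
  rw [PySem.Chars.isIn_iff_infix]
  obtain ⟨j, hj⟩ := (pvScanB_iff s).mp h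
  rw [pvHitB_iff] at hj
  have hdrop : ∀ p : List Char, p <+: s.drop j → "dashboard".toList <:+: p →
      "dashboard".toList <:+: s := fun p hp hd =>
    hd.trans (hp.isInfix.trans (List.drop_suffix j s).isInfix)
  rcases hj with h | h | h | h | h | h <;> exact hdrop _ h (by decide)

-- ===== VERDICT (by name: the statement is the Claim_ definition above) =====
theorem wants_dashboard_pin_py_spec : Claim_equal_wants_dashboard_pin_py := by
  intro query _
  unfold Spec_wants_dashboard_pin_py wants_dashboard_pin_py wants_dashboard_pin_py_alt
  dsimp only
  by_cases hdash : PySem.Chars.isIn "dashboard".toList (PySem.Chars.lower (query.getD "").toList) = true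
  · rw [hdash]
    simp only [Bool.not_true, Bool.false_eq_true, if_false]
    rw [Bool.eq_iff_iff]
    simp only [List.any_cons, List.any_nil, Bool.or_eq_true, Bool.false_eq_true, or_false]
    exact (pv_scan_iff_any _).symm
  · rw [Bool.not_eq_true] at hdash
    rw [hdash]
    simp only [Bool.not_false, if_true]
    cases hscan : pvScanB (PySem.Chars.lower (query.getD "").toList) with
    | false => rfl
    | true =>
      have h2 := pv_dash_of_scan hscan
      rw [hdash] at h2
      exact absurd h2 (by simp)
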